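-- pv_equiv track=rewrite | github.com/Ace1928/eidosian_forge | archive_forge/code/func_rle_get_at.py | rle_get_at
-- ===== SOURCE A (Python) =====
-- def rle_get_at(rle, pos: int):
--     """
--     Return the attribute at offset pos.
--     """
--     x = 0
--     if pos < 0:
--         return None
--     for a, run in rle:
--         if x + run > pos:
--             return a
--         x += run
--     return None
-- ===== SOURCE B (Python) =====
-- def rle_get_at(rle, pos: int):
--     """
--     Return the attribute at offset pos.
--
--     Two phases: first materialize a table of (cumulative end, attribute)
--     pairs, then search the table for the first end exceeding pos.
--     """
--     if pos < 0:
--         return None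
--     table = []
--     total = 0
--     for a, run in rle:
--         total += run
--         table.append((total, a))
--     for end, a in table:
--         if end > pos:
--             return a
--     return None
-- ===== Notes on version B (the rewrite author's own statement) =====
-- stated objective: alternative
-- what changed: Instead of A's single fused scan that maintains a running start offset and early-returns when x + run > pos, B first materializes a prefix table of (cumulative end, attribute) pairs and then searches that table for the first end exceeding pos.
import Mathlib
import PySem

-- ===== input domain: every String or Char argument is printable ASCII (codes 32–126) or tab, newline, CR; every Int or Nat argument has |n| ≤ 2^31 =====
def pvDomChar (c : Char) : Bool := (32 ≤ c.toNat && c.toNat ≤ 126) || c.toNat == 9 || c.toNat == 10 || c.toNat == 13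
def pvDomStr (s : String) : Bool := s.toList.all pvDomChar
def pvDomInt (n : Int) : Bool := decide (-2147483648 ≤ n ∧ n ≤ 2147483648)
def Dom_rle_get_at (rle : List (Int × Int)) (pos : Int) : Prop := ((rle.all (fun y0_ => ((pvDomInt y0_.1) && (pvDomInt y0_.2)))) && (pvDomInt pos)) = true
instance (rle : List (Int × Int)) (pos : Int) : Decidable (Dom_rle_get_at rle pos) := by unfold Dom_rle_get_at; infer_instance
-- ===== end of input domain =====

-- B replaces A's fused accumulate-and-compare scan with two phases: build a
-- prefix table of (cumulative end, attribute) pairs, then search it (objective: alternative);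
-- exact equivalence, no precondition.

-- ===== PORT A =====
-- the 'for a, run in rle' loop of A, carrying the running start offset x
def rleLoopA : List (Int × Int) → Int → Int → Option Int
  | [], _, _ => none
  | (a, run) :: t, pos, x => if x + run > pos then some a else rleLoopA t pos (x + run)

def rle_get_at (rle : List (Int × Int)) (pos : Int) : Option Int :=
  if pos < 0 then none else rleLoopA rle pos 0

-- ===== PORT B =====
-- second loop of Source B: first table entry whose cumulative end exceeds pos
def rleSearch : List (Int × Int) → Int → Option Int
  | [], _ => none
  | (e, a) :: t, pos => if e > pos then some a else rleSearch t pos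

def rle_get_at_alt (rle : List (Int × Int)) (pos : Int) : Option Int :=
  if pos < 0 then none
  else
    -- first loop of Source B: build the (cumulative end, attribute) table by a fold
    let table := (rle.foldl (fun (st : List (Int × Int) × Int) p =>
      (st.1 ++ [(st.2 + p.2, p.1)], st.2 + p.2)) (([], 0) : List (Int × Int) × Int)).1
    rleSearch table pos

-- ===== PRECONDITION & SPEC =====
def Spec_rle_get_at (rle : List (Int × Int)) (pos : Int) (out : Option Int) : Prop := out = rle_get_at_alt rle pos
instance (rle : List (Int × Int)) (pos : Int) (out : Option Int) : Decidable (Spec_rle_get_at rle pos out) := by unfold Spec_rle_get_at; infer_instance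

-- ===== CLAIM (what is proved, stated in full; the proofs are below) =====
def Claim_equal_rle_get_at : Prop := ∀ (rle : List (Int × Int)) (pos : Int), Dom_rle_get_at rle pos → Spec_rle_get_at rle pos (rle_get_at rle pos)

-- ===== LEMMAS AND PROOFS =====

-- spec form of B's table: the (cumulative end, attribute) pairs starting from offset x
def rleTab (x : Int) : List (Int × Int) → List (Int × Int)
  | [] => []
  | (a, run) :: t => (x + run, a) :: rleTab (x + run) t

theorem rleFold_eq_tab (rle : List (Int × Int)) (acc : List (Int × Int)) (x : Int) :
    (rle.foldl (fun (st : List (Int × Int) × Int) p =>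
      (st.1 ++ [(st.2 + p.2, p.1)], st.2 + p.2)) (acc, x)).1 = acc ++ rleTab x rle := by
  induction rle generalizing acc x with
  | nil => simp [rleTab]
  | cons hd t ih =>
    obtain ⟨a, run⟩ := hd
    simp [List.foldl_cons, rleTab, ih, List.append_assoc]

-- A's fused scan equals searching the materialized table
theorem rleLoopA_eq_search (rle : List (Int × Int)) (pos x : Int) :
    rleLoopA rle pos x = rleSearch (rleTab x rle) pos := by
  induction rle generalizing x with
  | nil => rfl
  | cons hd t ih =>
    obtain ⟨a, run⟩ := hd
    simp only [rleLoopA, rleTab, rleSearch, gt_iff_lt]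
    by_cases h : pos < x + run
    · rw [if_pos h, if_pos h]
    · rw [if_neg h, if_neg h, ih]

-- ===== VERDICT (by name: the statement is the Claim_ definition above) =====
theorem rle_get_at_spec : Claim_equal_rle_get_at := by
  intro rle pos _
  unfold Spec_rle_get_at rle_get_at rle_get_at_alt
  by_cases h : pos < 0
  · rw [if_pos h, if_pos h]
  · rw [if_neg h, if_neg h, rleFold_eq_tab, List.nil_append, rleLoopA_eq_search]
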